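-- pv_equiv track=rewrite | github.com/mobeenvaid-db/reporting-app | user_context.py | determine_user_roles
-- ===== SOURCE A (Python) =====
-- def determine_user_roles(groups: list[str]) -> tuple[bool, bool, bool]:
--     """
--     Determine user roles based on group membership
--
--     Returns:
--         (is_admin, is_analyst, is_viewer)
--     """
--     groups_lower = [g.lower() for g in groups]
--
--     is_admin = any(
--         admin_group in groups_lower
--         for admin_group in ["admins", "workspace admins", "account admins", "dashboard_admins"]
--     )
--
--     is_analyst = any(
--         analyst_group in groups_lower
--         for analyst_group in ["analysts", "data_analysts", "analytics_team"]
--     ) or is_admin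
--
--     is_viewer = len(groups) > 0 or is_analyst or is_admin
--
--     return is_admin, is_analyst, is_viewer
-- ===== SOURCE B (Python) =====
-- ADMIN_GROUPS = frozenset(["admins", "workspace admins", "account admins", "dashboard_admins"])
-- ANALYST_GROUPS = frozenset(["analysts", "data_analysts", "analytics_team"])
--
--
-- def determine_user_roles(groups: list[str]) -> tuple[bool, bool, bool]:
--     """Single pass over groups maintaining role flags."""
--     is_admin = False
--     analyst_hit = False
--     for g in groups:
--         gl = g.lower()
--         if gl in ADMIN_GROUPS:
--             is_admin = True
--         if gl in ANALYST_GROUPS: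
--             analyst_hit = True
--     is_analyst = analyst_hit or is_admin
--     is_viewer = bool(groups) or is_analyst or is_admin
--     return is_admin, is_analyst, is_viewer
-- ===== Notes on version B (the rewrite author's own statement) =====
-- stated objective: alternative
-- what changed: Replaces A's build-a-lowercased-list-then-scan-it-per-candidate-group structure (any(...) membership scans over groups_lower for each role) with one explicit pass over groups that lowercases each element once and maintains is_admin/analyst_hit flags via frozenset membership, deriving the triple after the loop.
import Mathlib
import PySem

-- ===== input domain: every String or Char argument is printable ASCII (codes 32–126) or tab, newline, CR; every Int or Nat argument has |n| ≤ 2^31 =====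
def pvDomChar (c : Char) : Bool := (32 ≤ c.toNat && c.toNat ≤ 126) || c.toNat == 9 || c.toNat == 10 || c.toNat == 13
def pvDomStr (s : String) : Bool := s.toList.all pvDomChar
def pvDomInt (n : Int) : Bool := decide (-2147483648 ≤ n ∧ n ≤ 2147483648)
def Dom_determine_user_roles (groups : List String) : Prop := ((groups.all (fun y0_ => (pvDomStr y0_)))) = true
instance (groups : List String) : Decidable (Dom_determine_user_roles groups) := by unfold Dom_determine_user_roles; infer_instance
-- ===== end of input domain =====

-- B replaces A's lowercased-list-plus-per-candidate-scans with one flag-maintaining pass; alternative decomposition, same results.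

-- ===== PORT A =====
def determine_user_roles (groups : List String) : Bool × Bool × Bool :=
  let groups_lower := groups.map PySem.Str.lower
  let is_admin :=
    (["admins", "workspace admins", "account admins", "dashboard_admins"]).any
      (fun admin_group => groups_lower.contains admin_group)
  let is_analyst :=
    ((["analysts", "data_analysts", "analytics_team"]).any
      (fun analyst_group => groups_lower.contains analyst_group)) || is_admin
  let is_viewer := decide ((groups.length : Int) > 0) || is_analyst || is_admin
  (is_admin, is_analyst, is_viewer)

-- ===== PORT B =====
def pvAdminGroups : List String := ["admins", "workspace admins", "account admins", "dashboard_admins"]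
def pvAnalystGroups : List String := ["analysts", "data_analysts", "analytics_team"]

def determine_user_roles_alt (groups : List String) : Bool × Bool × Bool :=
  let flags := groups.foldl
    (fun (st : Bool × Bool) g =>
      let gl := PySem.Str.lower g
      let a := if pvAdminGroups.contains gl then true else st.1
      let h := if pvAnalystGroups.contains gl then true else st.2
      (a, h))
    (false, false)
  let is_admin := flags.1
  let is_analyst := flags.2 || is_admin
  let is_viewer := !groups.isEmpty || is_analyst || is_admin
  (is_admin, is_analyst, is_viewer)

-- ===== PRECONDITION & SPEC =====
def Spec_determine_user_roles (groups : List String) (out : Bool × Bool × Bool) : Prop := out = determine_user_roles_alt groups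
instance (groups : List String) (out : Bool × Bool × Bool) : Decidable (Spec_determine_user_roles groups out) := by unfold Spec_determine_user_roles; infer_instance

-- ===== CLAIM (what is proved, stated in full; the proofs are below) =====
def Claim_equal_determine_user_roles : Prop := ∀ (groups : List String), Dom_determine_user_roles groups → Spec_determine_user_roles groups (determine_user_roles groups)

-- ===== LEMMAS AND PROOFS =====

-- B's loop leaves flags = (acc ∨ some group lowers into the set, …), by induction on the list.
theorem pv_foldl_flags (l : List String) (st : Bool × Bool) :
    l.foldl
      (fun (st : Bool × Bool) g =>
        let gl := PySem.Str.lower g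
        let a := if pvAdminGroups.contains gl then true else st.1
        let h := if pvAnalystGroups.contains gl then true else st.2
        (a, h)) st
    = (st.1 || l.any (fun g => pvAdminGroups.contains (PySem.Str.lower g)),
       st.2 || l.any (fun g => pvAnalystGroups.contains (PySem.Str.lower g))) := by
  induction l generalizing st with
  | nil => simp
  | cons x xs ih =>
    simp only [List.foldl_cons, List.any_cons, ih]
    split_ifs <;> simp_all

-- A's per-candidate scans of the lowered list equal B's per-element set tests.
theorem pv_any_swap (cands l : List String) :
    cands.any (fun c => (l.map PySem.Str.lower).contains c)
      = l.any (fun g => cands.contains (PySem.Str.lower g)) := by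
  rw [Bool.eq_iff_iff]
  simp only [List.any_eq_true, List.contains_iff_mem, List.mem_map]
  constructor
  · rintro ⟨c, hc, g, hg, rfl⟩; exact ⟨g, hg, hc⟩
  · rintro ⟨g, hg, hc⟩; exact ⟨_, hc, g, hg, rfl⟩

-- Python's 'len(groups) > 0' agrees with B's 'bool(groups)'.
theorem pv_len_pos (l : List String) : decide ((l.length : Int) > 0) = !l.isEmpty := by
  cases l with
  | nil => rfl
  | cons x xs =>
    simp only [List.isEmpty_cons, Bool.not_false, decide_eq_true_eq, List.length_cons]
    push_cast
    omega

-- ===== VERDICT (by name: the statement is the Claim_ definition above) =====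
theorem determine_user_roles_spec : Claim_equal_determine_user_roles := by
  intro groups _
  show determine_user_roles groups = determine_user_roles_alt groups
  simp only [determine_user_roles, determine_user_roles_alt]
  rw [pv_foldl_flags]
  simp only [Bool.false_or, pv_len_pos]
  rw [pv_any_swap, pv_any_swap]
  rfl
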